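-- pv_equiv track=rewrite | github.com/fabranx/AdventOfCode | 2024/event21/event21.py | find_directionalKeypadRobot_moves
-- ===== SOURCE A (Python) =====
-- DIRECTIONS = {
--     '^': (-1, 0),
--     '<': (0, -1),
--     'v': (1, 0),
--     '>': (0, 1),
-- }
--
-- DIRECTIONAL_KEYPAD = {
--     # '_': (0,0),
--     '^': (0, 1),
--     'A': (0, 2),
--     '<': (1, 0),
--     'v': (1, 1),
--     '>': (1, 2),
-- }
--
-- def sortMoves(moves):
--     right_moves = moves.count('>')
--     up_moves = moves.count('^')
--     down_moves = moves.count('v')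
--     left_moves = moves.count('<')
--
--     new_moves = []
--     for _ in range(left_moves):
--         new_moves.append('<')
--     for _ in range(down_moves):
--         new_moves.append('v')
--     for _ in range(up_moves):
--         new_moves.append('^')
--     for _ in range(right_moves):
--         new_moves.append('>')
--
--
--
--     return new_moves
--
-- def find_directionalKeypadRobot_moves(button, robotPos):
--     button_pos = DIRECTIONAL_KEYPAD[button]
--     diff_pos = (button_pos[0] - robotPos[0], button_pos[1] - robotPos[1])
--     moves = []
--     if diff_pos[0] < 0:
--         for _ in range(abs(diff_pos[0])):
--             moves.append('^')
--     elif diff_pos[0] > 0: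
--         for _ in range(abs(diff_pos[0])):
--             moves.append('v')
--     if diff_pos[1] > 0:
--         for _ in range(abs(diff_pos[1])):
--             moves.append('>')
--     elif diff_pos[1] < 0:
--         for _ in range(abs(diff_pos[1])):
--             moves.append('<')
--
--     moves = sortMoves(moves)
--     isValid = check_directionalKeypad_valid_moves(moves, robotPos)
--
--     if not isValid:
--         moves = moves[::-1]
--     moves.append('A')
--     return moves
--
-- def check_directionalKeypad_valid_moves(moves, pos):
--     curr_pos = pos
--     for move in moves:
--         direction = DIRECTIONS[move]
--         curr_pos = (curr_pos[0]+direction[0], curr_pos[1]+direction[1])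
--         if curr_pos not in DIRECTIONAL_KEYPAD.values():
--             return False
--
--     return True
-- ===== SOURCE B (Python) =====
-- # B: no path simulation and no reversal -- validity of the canonical block order is
-- # decided by O(1) closed-form interval arithmetic, and the move blocks are emitted
-- # directly in the chosen order.
-- KEYPAD = {'^': (0, 1), 'A': (0, 2), '<': (1, 0), 'v': (1, 1), '>': (1, 2)}
--
-- def _row_ok(row, lo, hi):
--     # every (row, col) with lo <= col <= hi lies on the keypad (vacuous if lo > hi)
--     return hi < lo or (0 <= row <= 1 and 0 <= lo and hi <= 2
--                        and not (row == 0 and lo <= 0 <= hi))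
--
-- def _col_ok(col, lo, hi):
--     # every (r, col) with lo <= r <= hi lies on the keypad (vacuous if lo > hi)
--     return hi < lo or (0 <= col <= 2 and 0 <= lo and hi <= 1
--                        and not (col == 0 and lo <= 0 <= hi))
--
-- def find_directionalKeypadRobot_moves(button, robotPos):
--     tr, tc = KEYPAD[button]
--     r, c = robotPos
--     vert = ['^'] * (r - tr) if tr < r else ['v'] * (tr - r)
--     left = ['<'] * (c - tc)   # empty unless tc < c
--     right = ['>'] * (tc - c)  # empty unless tc > c
--     # rows visited by the vertical block (strictly after the start row)
--     vlo, vhi = (tr, r - 1) if tr < r else (r + 1, tr)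
--     if tc < c:    # canonical order: left block then vertical block
--         valid = _row_ok(r, tc, c - 1) and _col_ok(tc, vlo, vhi)
--     elif c < tc:  # canonical order: vertical block then right block
--         valid = _col_ok(c, vlo, vhi) and _row_ok(tr, c + 1, tc)
--     else:
--         valid = _col_ok(c, vlo, vhi)
--     moves = left + vert + right if valid else right + vert + left
--     return moves + ['A']
-- ===== Notes on version B (the rewrite author's own statement) =====
-- stated objective: alternative
-- what changed: B drops A's sortMoves canonicalisation pass, the dict-driven step-by-step path simulation and the list reversal: it decides validity of the canonical block order by O(1) closed-form interval tests on the row/column segments the path would sweep, and emits the homogeneous move blocks directly in the chosen order.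
import Mathlib
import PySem

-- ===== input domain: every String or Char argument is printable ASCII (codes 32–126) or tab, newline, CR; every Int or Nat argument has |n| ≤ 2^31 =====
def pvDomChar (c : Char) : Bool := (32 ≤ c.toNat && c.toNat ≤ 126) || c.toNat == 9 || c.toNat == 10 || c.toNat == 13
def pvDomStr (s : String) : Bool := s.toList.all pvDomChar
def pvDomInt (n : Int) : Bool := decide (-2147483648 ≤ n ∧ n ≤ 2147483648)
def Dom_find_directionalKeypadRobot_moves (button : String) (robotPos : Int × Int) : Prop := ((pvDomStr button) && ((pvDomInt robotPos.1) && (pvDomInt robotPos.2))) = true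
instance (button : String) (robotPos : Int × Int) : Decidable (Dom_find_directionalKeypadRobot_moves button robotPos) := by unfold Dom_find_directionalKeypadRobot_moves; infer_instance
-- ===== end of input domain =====

-- B replaces A's sortMoves pass, dict-driven path simulation and list reversal by
-- O(1) closed-form interval tests for validity and direct emission of the move blocks.

-- ===== PORT A =====
def pyDIRECTIONS : PySem.Dict String (Int × Int) :=
  PySem.Dict.ofList [("^", (-1, 0)), ("<", (0, -1)), ("v", (1, 0)), (">", (0, 1))]

def pyDIRECTIONAL_KEYPAD : PySem.Dict String (Int × Int) :=
  PySem.Dict.ofList [("^", (0, 1)), ("A", (0, 2)), ("<", (1, 0)), ("v", (1, 1)), (">", (1, 2))]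

-- 'for _ in range(k): new_moves.append(m)' appends m exactly k times: List.replicate
def sortMovesPort (moves : List String) : List String :=
  List.replicate (PySem.List.count moves "<") "<" ++
  List.replicate (PySem.List.count moves "v") "v" ++
  List.replicate (PySem.List.count moves "^") "^" ++
  List.replicate (PySem.List.count moves ">") ">"

-- DIRECTIONS[move]: in A, moves only ever hold keys of DIRECTIONS, so the getD default is never taken
def checkPort : List String → (Int × Int) → Bool
  | [], _ => true
  | m :: rest, pos =>
    let dir := (PySem.Dict.get? pyDIRECTIONS m).getD (0, 0)
    let curr : Int × Int := (pos.1 + dir.1, pos.2 + dir.2)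
    if (PySem.Dict.values pyDIRECTIONAL_KEYPAD).contains curr then checkPort rest curr
    else false

-- DIRECTIONAL_KEYPAD[button] raises KeyError for an unknown button: those inputs are outside Pre_
def find_directionalKeypadRobot_moves (button : String) (robotPos : Int × Int) : List String :=
  let button_pos := (PySem.Dict.get? pyDIRECTIONAL_KEYPAD button).getD (0, 0)
  let diff_pos : Int × Int := (button_pos.1 - robotPos.1, button_pos.2 - robotPos.2)
  let moves : List String :=
    (if diff_pos.1 < 0 then List.replicate diff_pos.1.natAbs "^"
     else if diff_pos.1 > 0 then List.replicate diff_pos.1.natAbs "v" else []) ++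
    (if diff_pos.2 > 0 then List.replicate diff_pos.2.natAbs ">"
     else if diff_pos.2 < 0 then List.replicate diff_pos.2.natAbs "<" else [])
  let moves := sortMovesPort moves
  let isValid := checkPort moves robotPos
  let moves := if isValid then moves else moves.reverse
  moves ++ ["A"]

-- ===== PORT B =====
def pvKEYPAD : PySem.Dict String (Int × Int) :=
  PySem.Dict.ofList [("^", (0, 1)), ("A", (0, 2)), ("<", (1, 0)), ("v", (1, 1)), (">", (1, 2))]

-- every (row, col) with lo ≤ col ≤ hi lies on the keypad (vacuous if lo > hi)
def pvRowOk (row lo hi : Int) : Bool :=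
  decide (hi < lo ∨ (0 ≤ row ∧ row ≤ 1 ∧ 0 ≤ lo ∧ hi ≤ 2 ∧ ¬(row = 0 ∧ lo ≤ 0 ∧ 0 ≤ hi)))

-- every (r, col) with lo ≤ r ≤ hi lies on the keypad (vacuous if lo > hi)
def pvColOk (col lo hi : Int) : Bool :=
  decide (hi < lo ∨ (0 ≤ col ∧ col ≤ 2 ∧ 0 ≤ lo ∧ hi ≤ 1 ∧ ¬(col = 0 ∧ lo ≤ 0 ∧ 0 ≤ hi)))

-- ['x'] * n with a possibly negative n is List.replicate n.toNat
def find_directionalKeypadRobot_moves_alt (button : String) (robotPos : Int × Int) : List String :=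
  let t := (PySem.Dict.get? pvKEYPAD button).getD (0, 0)
  let r := robotPos.1
  let c := robotPos.2
  let vert := if t.1 < r then List.replicate (r - t.1).toNat "^" else List.replicate (t.1 - r).toNat "v"
  let left := List.replicate (c - t.2).toNat "<"
  let right := List.replicate (t.2 - c).toNat ">"
  let vlo := if t.1 < r then t.1 else r + 1
  let vhi := if t.1 < r then r - 1 else t.1
  let valid :=
    if t.2 < c then pvRowOk r t.2 (c - 1) && pvColOk t.2 vlo vhi
    else if c < t.2 then pvColOk c vlo vhi && pvRowOk t.1 (c + 1) t.2
    else pvColOk c vlo vhi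
  (if valid then left ++ vert ++ right else right ++ vert ++ left) ++ ["A"]

-- ===== PRECONDITION & SPEC =====
-- Pre_ excludes exactly the buttons that are not directional-keypad keys, on which A raises KeyError.
def Pre_find_directionalKeypadRobot_moves (button : String) (robotPos : Int × Int) : Prop :=
  button = "^" ∨ button = "A" ∨ button = "<" ∨ button = "v" ∨ button = ">"
instance (button : String) (robotPos : Int × Int) : Decidable (Pre_find_directionalKeypadRobot_moves button robotPos) := by unfold Pre_find_directionalKeypadRobot_moves; infer_instance

def pvWitness_find_directionalKeypadRobot_moves : String × (Int × Int) := ("A", (1, 0))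

def Spec_find_directionalKeypadRobot_moves (button : String) (robotPos : Int × Int) (out : List String) : Prop := out = find_directionalKeypadRobot_moves_alt button robotPos
instance (button : String) (robotPos : Int × Int) (out : List String) : Decidable (Spec_find_directionalKeypadRobot_moves button robotPos out) := by unfold Spec_find_directionalKeypadRobot_moves; infer_instance

-- ===== CLAIM (what is proved, stated in full; the proofs are below) =====
def Claim_equal_find_directionalKeypadRobot_moves : Prop := ∀ (button : String) (robotPos : Int × Int), Dom_find_directionalKeypadRobot_moves button robotPos → Pre_find_directionalKeypadRobot_moves button robotPos → Spec_find_directionalKeypadRobot_moves button robotPos (find_directionalKeypadRobot_moves button robotPos)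

-- ===== LEMMAS AND PROOFS =====

theorem contains_vals (p : Int × Int) :
    (PySem.Dict.values pyDIRECTIONAL_KEYPAD).contains p
      = decide (0 ≤ p.1 ∧ p.1 ≤ 1 ∧ 0 ≤ p.2 ∧ p.2 ≤ 2 ∧ ¬(p.1 = 0 ∧ p.2 = 0)) := by
  obtain ⟨a, b⟩ := p
  have hv : PySem.Dict.values pyDIRECTIONAL_KEYPAD
      = [((0:Int),(1:Int)),(0,2),(1,0),(1,1),(1,2)] := by decide
  rw [hv, Bool.eq_iff_iff]
  simp only [List.contains_cons, List.contains_nil, Bool.or_eq_true, beq_iff_eq,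
    Prod.mk.injEq, decide_eq_true_eq, Bool.false_eq_true, or_false]
  omega

theorem chkLeft (k : ℕ) (r c : Int) (rest : List String) :
    checkPort (List.replicate k "<" ++ rest) (r, c)
      = (pvRowOk r (c - k) (c - 1) && checkPort rest (r, c - k)) := by
  induction k generalizing c with
  | zero =>
    simp only [List.replicate_zero, List.nil_append, Nat.cast_zero, sub_zero]
    rw [show pvRowOk r c (c - 1) = true by rw [pvRowOk]; rw [decide_eq_true_eq]; omega, Bool.true_and]
  | succ k ih =>
    have g : (PySem.Dict.get? pyDIRECTIONS "<").getD (0, 0) = ((0 : Int), (-1 : Int)) := by decide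
    simp only [List.replicate_succ, List.cons_append, checkPort, g, contains_vals]
    rw [show r + 0 = r from by ring, show c + -1 = c - 1 from by ring, ih]
    rw [show c - 1 - (k : Int) = c - ((k : ℕ) + 1 : ℕ) from by push_cast; ring]
    by_cases h : (0 ≤ r ∧ r ≤ 1 ∧ 0 ≤ c - 1 ∧ c - 1 ≤ 2 ∧ ¬(r = 0 ∧ c - 1 = 0))
    · rw [if_pos (by rw [decide_eq_true_eq]; exact h)]
      congr 1
      rw [pvRowOk, pvRowOk, Bool.eq_iff_iff, decide_eq_true_eq, decide_eq_true_eq]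
      push_cast; omega
    · rw [if_neg (by rw [decide_eq_true_eq]; exact h)]
      rw [show pvRowOk r (c - ((k : ℕ) + 1 : ℕ)) (c - 1) = false from by
        rw [pvRowOk, decide_eq_false_iff_not]; push_cast; omega, Bool.false_and]

theorem chkRight (k : ℕ) (r c : Int) (rest : List String) :
    checkPort (List.replicate k ">" ++ rest) (r, c)
      = (pvRowOk r (c + 1) (c + k) && checkPort rest (r, c + k)) := by
  induction k generalizing c with
  | zero =>
    simp only [List.replicate_zero, List.nil_append, Nat.cast_zero, add_zero]
    rw [show pvRowOk r (c + 1) c = true by rw [pvRowOk]; rw [decide_eq_true_eq]; omega, Bool.true_and]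
  | succ k ih =>
    have g : (PySem.Dict.get? pyDIRECTIONS ">").getD (0, 0) = ((0 : Int), (1 : Int)) := by decide
    simp only [List.replicate_succ, List.cons_append, checkPort, g, contains_vals]
    rw [show r + 0 = r from by ring, ih]
    rw [show c + 1 + (k : Int) = c + ((k : ℕ) + 1 : ℕ) from by push_cast; ring]
    by_cases h : (0 ≤ r ∧ r ≤ 1 ∧ 0 ≤ c + 1 ∧ c + 1 ≤ 2 ∧ ¬(r = 0 ∧ c + 1 = 0))
    · rw [if_pos (by rw [decide_eq_true_eq]; exact h)]
      congr 1
      rw [pvRowOk, pvRowOk, Bool.eq_iff_iff, decide_eq_true_eq, decide_eq_true_eq]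
      push_cast; omega
    · rw [if_neg (by rw [decide_eq_true_eq]; exact h)]
      rw [show pvRowOk r (c + 1) (c + ((k : ℕ) + 1 : ℕ)) = false from by
        rw [pvRowOk, decide_eq_false_iff_not]; push_cast; omega, Bool.false_and]

theorem chkUp (k : ℕ) (r c : Int) (rest : List String) :
    checkPort (List.replicate k "^" ++ rest) (r, c)
      = (pvColOk c (r - k) (r - 1) && checkPort rest (r - k, c)) := by
  induction k generalizing r with
  | zero =>
    simp only [List.replicate_zero, List.nil_append, Nat.cast_zero, sub_zero]
    rw [show pvColOk c r (r - 1) = true by rw [pvColOk]; rw [decide_eq_true_eq]; omega, Bool.true_and]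
  | succ k ih =>
    have g : (PySem.Dict.get? pyDIRECTIONS "^").getD (0, 0) = ((-1 : Int), (0 : Int)) := by decide
    simp only [List.replicate_succ, List.cons_append, checkPort, g, contains_vals]
    rw [show r + -1 = r - 1 from by ring, show c + 0 = c from by ring, ih]
    rw [show r - 1 - (k : Int) = r - ((k : ℕ) + 1 : ℕ) from by push_cast; ring]
    by_cases h : (0 ≤ r - 1 ∧ r - 1 ≤ 1 ∧ 0 ≤ c ∧ c ≤ 2 ∧ ¬(r - 1 = 0 ∧ c = 0))
    · rw [if_pos (by rw [decide_eq_true_eq]; exact h)]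
      congr 1
      rw [pvColOk, pvColOk, Bool.eq_iff_iff, decide_eq_true_eq, decide_eq_true_eq]
      push_cast; omega
    · rw [if_neg (by rw [decide_eq_true_eq]; exact h)]
      rw [show pvColOk c (r - ((k : ℕ) + 1 : ℕ)) (r - 1) = false from by
        rw [pvColOk, decide_eq_false_iff_not]; push_cast; omega, Bool.false_and]

theorem chkDown (k : ℕ) (r c : Int) (rest : List String) :
    checkPort (List.replicate k "v" ++ rest) (r, c)
      = (pvColOk c (r + 1) (r + k) && checkPort rest (r + k, c)) := by
  induction k generalizing r with
  | zero =>
    simp only [List.replicate_zero, List.nil_append, Nat.cast_zero, add_zero]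
    rw [show pvColOk c (r + 1) r = true by rw [pvColOk]; rw [decide_eq_true_eq]; omega, Bool.true_and]
  | succ k ih =>
    have g : (PySem.Dict.get? pyDIRECTIONS "v").getD (0, 0) = ((1 : Int), (0 : Int)) := by decide
    simp only [List.replicate_succ, List.cons_append, checkPort, g, contains_vals]
    rw [show c + 0 = c from by ring, ih]
    rw [show r + 1 + (k : Int) = r + ((k : ℕ) + 1 : ℕ) from by push_cast; ring]
    by_cases h : (0 ≤ r + 1 ∧ r + 1 ≤ 1 ∧ 0 ≤ c ∧ c ≤ 2 ∧ ¬(r + 1 = 0 ∧ c = 0))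
    · rw [if_pos (by rw [decide_eq_true_eq]; exact h)]
      congr 1
      rw [pvColOk, pvColOk, Bool.eq_iff_iff, decide_eq_true_eq, decide_eq_true_eq]
      push_cast; omega
    · rw [if_neg (by rw [decide_eq_true_eq]; exact h)]
      rw [show pvColOk c (r + 1) (r + ((k : ℕ) + 1 : ℕ)) = false from by
        rw [pvColOk, decide_eq_false_iff_not]; push_cast; omega, Bool.false_and]

theorem chkRight0 (k : ℕ) (r c : Int) :
    checkPort (List.replicate k ">") (r, c) = pvRowOk r (c + 1) (c + k) := by
  have h := chkRight k r c []
  rw [List.append_nil] at h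
  rw [h, show checkPort [] (r, c + (k : Int)) = true from rfl, Bool.and_true]

-- sortMoves applied to A's raw moves produces exactly left ++ vert ++ right
theorem sorted_eq_blocks (tr tc r c : Int) :
    sortMovesPort
      ((if tr - r < 0 then List.replicate (tr - r).natAbs "^"
        else if tr - r > 0 then List.replicate (tr - r).natAbs "v" else []) ++
       (if tc - c > 0 then List.replicate (tc - c).natAbs ">"
        else if tc - c < 0 then List.replicate (tc - c).natAbs "<" else [])) =
    List.replicate (c - tc).toNat "<" ++
      (if tr < r then List.replicate (r - tr).toNat "^" else List.replicate (tr - r).toNat "v") ++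
      List.replicate (tc - c).toNat ">" := by
  rcases show tc < c ∨ tc = c ∨ c < tc from by omega with hc | hc | hc <;>
    rcases show tr < r ∨ tr = r ∨ r < tr from by omega with hr | hr | hr
  · rw [if_pos (show tr - r < 0 by omega), if_neg (show ¬ (tc - c > 0) by omega), if_pos (show tc - c < 0 by omega), if_pos (show tr < r by omega)]
    simp only [sortMovesPort, PySem.List.count_eq, List.count_append, List.count_replicate]
    simp [show (tr - r).natAbs = (r - tr).toNat from by omega,
      show (tc - c).natAbs = (c - tc).toNat from by omega,
      show (tc - c).toNat = 0 from by omega]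
  · rw [if_neg (show ¬ (tr - r < 0) by omega), if_neg (show ¬ (tr - r > 0) by omega), if_neg (show ¬ (tc - c > 0) by omega), if_pos (show tc - c < 0 by omega), if_neg (show ¬ (tr < r) by omega)]
    simp only [sortMovesPort, PySem.List.count_eq, List.count_append, List.count_replicate]
    simp [show (tr - r).toNat = 0 from by omega,
      show (tc - c).natAbs = (c - tc).toNat from by omega,
      show (tc - c).toNat = 0 from by omega]
  · rw [if_neg (show ¬ (tr - r < 0) by omega), if_pos (show tr - r > 0 by omega), if_neg (show ¬ (tc - c > 0) by omega), if_pos (show tc - c < 0 by omega), if_neg (show ¬ (tr < r) by omega)]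
    simp only [sortMovesPort, PySem.List.count_eq, List.count_append, List.count_replicate]
    simp [show (tr - r).natAbs = (tr - r).toNat from by omega,
      show (tc - c).natAbs = (c - tc).toNat from by omega,
      show (tc - c).toNat = 0 from by omega]
  · rw [if_pos (show tr - r < 0 by omega), if_neg (show ¬ (tc - c > 0) by omega), if_neg (show ¬ (tc - c < 0) by omega), if_pos (show tr < r by omega)]
    simp only [sortMovesPort, PySem.List.count_eq, List.count_append, List.count_replicate]
    simp [show (tr - r).natAbs = (r - tr).toNat from by omega,
      show (tc - c).toNat = 0 from by omega,
      show (c - tc).toNat = 0 from by omega]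
  · rw [if_neg (show ¬ (tr - r < 0) by omega), if_neg (show ¬ (tr - r > 0) by omega), if_neg (show ¬ (tc - c > 0) by omega), if_neg (show ¬ (tc - c < 0) by omega), if_neg (show ¬ (tr < r) by omega)]
    simp only [sortMovesPort, PySem.List.count_eq, List.count_append, List.count_replicate]
    simp [show (tr - r).toNat = 0 from by omega,
      show (tc - c).toNat = 0 from by omega,
      show (c - tc).toNat = 0 from by omega]
  · rw [if_neg (show ¬ (tr - r < 0) by omega), if_pos (show tr - r > 0 by omega), if_neg (show ¬ (tc - c > 0) by omega), if_neg (show ¬ (tc - c < 0) by omega), if_neg (show ¬ (tr < r) by omega)]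
    simp only [sortMovesPort, PySem.List.count_eq, List.count_append, List.count_replicate]
    simp [show (tr - r).natAbs = (tr - r).toNat from by omega,
      show (tc - c).toNat = 0 from by omega,
      show (c - tc).toNat = 0 from by omega]
  · rw [if_pos (show tr - r < 0 by omega), if_pos (show tc - c > 0 by omega), if_pos (show tr < r by omega)]
    simp only [sortMovesPort, PySem.List.count_eq, List.count_append, List.count_replicate]
    simp [show (tr - r).natAbs = (r - tr).toNat from by omega,
      show (tc - c).natAbs = (tc - c).toNat from by omega,
      show (c - tc).toNat = 0 from by omega]
  · rw [if_neg (show ¬ (tr - r < 0) by omega), if_neg (show ¬ (tr - r > 0) by omega), if_pos (show tc - c > 0 by omega), if_neg (show ¬ (tr < r) by omega)]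
    simp only [sortMovesPort, PySem.List.count_eq, List.count_append, List.count_replicate]
    simp [show (tr - r).toNat = 0 from by omega,
      show (tc - c).natAbs = (tc - c).toNat from by omega,
      show (c - tc).toNat = 0 from by omega]
  · rw [if_neg (show ¬ (tr - r < 0) by omega), if_pos (show tr - r > 0 by omega), if_pos (show tc - c > 0 by omega), if_neg (show ¬ (tr < r) by omega)]
    simp only [sortMovesPort, PySem.List.count_eq, List.count_append, List.count_replicate]
    simp [show (tr - r).natAbs = (tr - r).toNat from by omega,
      show (tc - c).natAbs = (tc - c).toNat from by omega,
      show (c - tc).toNat = 0 from by omega]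

-- the core: A's body equals B's body, parametric in the target (tr, tc)
theorem core_eq (tr tc r c : Int) :
    (let moves := sortMovesPort
        ((if tr - r < 0 then List.replicate (tr - r).natAbs "^"
          else if tr - r > 0 then List.replicate (tr - r).natAbs "v" else []) ++
         (if tc - c > 0 then List.replicate (tc - c).natAbs ">"
          else if tc - c < 0 then List.replicate (tc - c).natAbs "<" else []));
      (if checkPort moves (r, c) then moves else moves.reverse) ++ ["A"])
    = (let vert := if tr < r then List.replicate (r - tr).toNat "^" else List.replicate (tr - r).toNat "v";
       let left := List.replicate (c - tc).toNat "<";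
       let right := List.replicate (tc - c).toNat ">";
       let vlo := if tr < r then tr else r + 1;
       let vhi := if tr < r then r - 1 else tr;
       let valid :=
         if tc < c then pvRowOk r tc (c - 1) && pvColOk tc vlo vhi
         else if c < tc then pvColOk c vlo vhi && pvRowOk tr (c + 1) tc
         else pvColOk c vlo vhi;
       (if valid then left ++ vert ++ right else right ++ vert ++ left) ++ ["A"]) := by
  simp only []
  rw [sorted_eq_blocks tr tc r c]
  -- evaluate checkPort on the three blocks
  have hchk :
      checkPort (List.replicate (c - tc).toNat "<" ++
        ((if tr < r then List.replicate (r - tr).toNat "^" else List.replicate (tr - r).toNat "v") ++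
          List.replicate (tc - c).toNat ">")) (r, c)
      = (if tc < c then pvRowOk r tc (c - 1) && pvColOk tc (if tr < r then tr else r + 1) (if tr < r then r - 1 else tr)
         else if c < tc then pvColOk c (if tr < r then tr else r + 1) (if tr < r then r - 1 else tr) && pvRowOk tr (c + 1) tc
         else pvColOk c (if tr < r then tr else r + 1) (if tr < r then r - 1 else tr)) := by
    rw [chkLeft]
    by_cases hv : tr < r
    · rw [if_pos hv, chkUp, chkRight0]
      have h1 : r - ((r - tr).toNat : Int) = tr := by omega
      rw [h1]
      rcases show tc < c ∨ tc = c ∨ c < tc from by omega with hc | hc | hc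
      · rw [if_pos hc]
        have h2 : c - ((c - tc).toNat : Int) = tc := by omega
        have h3 : ((tc - c).toNat : Int) = 0 := by omega
        rw [h2, h3, show pvRowOk tr (tc + 1) (tc + 0) = true from by
          rw [pvRowOk]; rw [decide_eq_true_eq]; omega, Bool.and_true]
        simp only [if_pos hv]
      · rw [if_neg (show ¬ tc < c by omega), if_neg (show ¬ c < tc by omega)]
        have h2 : c - ((c - tc).toNat : Int) = c := by omega
        have h3 : ((tc - c).toNat : Int) = 0 := by omega
        rw [h2, h3, show pvRowOk r c (c - 1) = true from by
          rw [pvRowOk]; rw [decide_eq_true_eq]; omega,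
          show pvRowOk tr (c + 1) (c + 0) = true from by
          rw [pvRowOk]; rw [decide_eq_true_eq]; omega, Bool.true_and, Bool.and_true]
        simp only [if_pos hv]
      · rw [if_neg (show ¬ tc < c by omega), if_pos hc]
        have h2 : ((c - tc).toNat : Int) = 0 := by omega
        have h3 : c - (0 : Int) = c := by ring
        have h4 : c + ((tc - c).toNat : Int) = tc := by omega
        rw [h2, h3, h4, show pvRowOk r c (c - 1) = true from by
          rw [pvRowOk]; rw [decide_eq_true_eq]; omega, Bool.true_and]
        simp only [if_pos hv]
    · rw [if_neg hv, chkDown, chkRight0]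
      have h1 : r + ((tr - r).toNat : Int) = tr := by omega
      rw [h1]
      rcases show tc < c ∨ tc = c ∨ c < tc from by omega with hc | hc | hc
      · rw [if_pos hc]
        have h2 : c - ((c - tc).toNat : Int) = tc := by omega
        have h3 : ((tc - c).toNat : Int) = 0 := by omega
        rw [h2, h3, show pvRowOk tr (tc + 1) (tc + 0) = true from by
          rw [pvRowOk]; rw [decide_eq_true_eq]; omega, Bool.and_true]
        simp only [if_neg hv]
      · rw [if_neg (show ¬ tc < c by omega), if_neg (show ¬ c < tc by omega)]
        have h2 : c - ((c - tc).toNat : Int) = c := by omega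
        have h3 : ((tc - c).toNat : Int) = 0 := by omega
        rw [h2, h3, show pvRowOk r c (c - 1) = true from by
          rw [pvRowOk]; rw [decide_eq_true_eq]; omega,
          show pvRowOk tr (c + 1) (c + 0) = true from by
          rw [pvRowOk]; rw [decide_eq_true_eq]; omega, Bool.true_and, Bool.and_true]
        simp only [if_neg hv]
      · rw [if_neg (show ¬ tc < c by omega), if_pos hc]
        have h2 : ((c - tc).toNat : Int) = 0 := by omega
        have h3 : c - (0 : Int) = c := by ring
        have h4 : c + ((tc - c).toNat : Int) = tc := by omega
        rw [h2, h3, h4, show pvRowOk r c (c - 1) = true from by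
          rw [pvRowOk]; rw [decide_eq_true_eq]; omega, Bool.true_and]
        simp only [if_neg hv]
  rw [← List.append_assoc] at hchk
  rw [hchk]
  split_ifs <;>
    simp [List.reverse_append, List.reverse_replicate, List.append_assoc]

-- ===== VERDICT (by name: the statement is the Claim_ definition above) =====
theorem find_directionalKeypadRobot_moves_spec : Claim_equal_find_directionalKeypadRobot_moves := by
  intro button robotPos _ hpre
  obtain ⟨r, c⟩ := robotPos
  unfold Spec_find_directionalKeypadRobot_moves
  unfold find_directionalKeypadRobot_moves find_directionalKeypadRobot_moves_alt
  rcases hpre with rfl | rfl | rfl | rfl | rfl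
  · have kA : PySem.Dict.get? pyDIRECTIONAL_KEYPAD "^" = some ((0 : Int), (1 : Int)) := by decide
    have kB : PySem.Dict.get? pvKEYPAD "^" = some ((0 : Int), (1 : Int)) := by decide
    simp only [kA, kB, Option.getD_some]
    exact core_eq 0 1 r c
  · have kA : PySem.Dict.get? pyDIRECTIONAL_KEYPAD "A" = some ((0 : Int), (2 : Int)) := by decide
    have kB : PySem.Dict.get? pvKEYPAD "A" = some ((0 : Int), (2 : Int)) := by decide
    simp only [kA, kB, Option.getD_some]
    exact core_eq 0 2 r c
  · have kA : PySem.Dict.get? pyDIRECTIONAL_KEYPAD "<" = some ((1 : Int), (0 : Int)) := by decide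
    have kB : PySem.Dict.get? pvKEYPAD "<" = some ((1 : Int), (0 : Int)) := by decide
    simp only [kA, kB, Option.getD_some]
    exact core_eq 1 0 r c
  · have kA : PySem.Dict.get? pyDIRECTIONAL_KEYPAD "v" = some ((1 : Int), (1 : Int)) := by decide
    have kB : PySem.Dict.get? pvKEYPAD "v" = some ((1 : Int), (1 : Int)) := by decide
    simp only [kA, kB, Option.getD_some]
    exact core_eq 1 1 r c
  · have kA : PySem.Dict.get? pyDIRECTIONAL_KEYPAD ">" = some ((1 : Int), (2 : Int)) := by decide
    have kB : PySem.Dict.get? pvKEYPAD ">" = some ((1 : Int), (2 : Int)) := by decide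
    simp only [kA, kB, Option.getD_some]
    exact core_eq 1 2 r c
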